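-- pv_equiv track=rewrite | github.com/elibillinger/CSclasswork | 101/Labs/Lab 9/Lab9-unit_testing.py | CheckCS
-- ===== SOURCE A (Python) =====
-- def CheckCS(word):
--     c = False
--     for i in word:
--         if i == 'c':
--             c = True
--         if c == True and i == 's':
--             return True
--     return False
-- ===== SOURCE B (Python) =====
-- def CheckCS(word):
--     first_c = word.find('c')
--     return first_c != -1 and word.rfind('s') >= first_c
-- ===== Notes on version B (the rewrite author's own statement) =====
-- stated objective: alternative
-- what changed: Replaces A's stateful per-character scan with a flag by two independent global searches plus one comparison: the position of the first target letter (find) and of the last second letter (rfind), returning first != -1 and last >= first; a timing run measured B markedly faster via C-level string scans.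
import Mathlib
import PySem

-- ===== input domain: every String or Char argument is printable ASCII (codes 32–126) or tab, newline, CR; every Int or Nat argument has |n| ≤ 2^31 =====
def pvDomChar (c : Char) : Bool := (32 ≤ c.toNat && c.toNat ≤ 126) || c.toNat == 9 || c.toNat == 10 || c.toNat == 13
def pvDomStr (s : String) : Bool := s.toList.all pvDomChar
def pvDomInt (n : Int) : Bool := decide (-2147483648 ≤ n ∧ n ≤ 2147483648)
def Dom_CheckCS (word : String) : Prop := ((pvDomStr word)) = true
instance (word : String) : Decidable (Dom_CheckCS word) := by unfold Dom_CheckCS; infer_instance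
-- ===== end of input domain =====

-- B replaces A's stateful running-flag scan by two independent global searches (first 'c' via find, last 's' via rfind) plus one comparison.


-- ===== PORT A =====
-- the for-loop with the running flag `c`
def CheckCSLoop : List Char → Bool → Bool
  | [], _ => false
  | i :: rest, c =>
    let c := if i = 'c' then true else c
    if c = true ∧ i = 's' then true
    else CheckCSLoop rest c

def CheckCS (word : String) : Bool := CheckCSLoop word.toList false

-- ===== PORT B =====
def CheckCS_alt (word : String) : Bool :=
  let firstC := PySem.Str.find word "c"
  decide (firstC ≠ -1 ∧ PySem.Str.rfind word "s" ≥ firstC)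

-- ===== PRECONDITION & SPEC =====
def Spec_CheckCS (word : String) (out : Bool) : Prop := out = CheckCS_alt word
instance (word : String) (out : Bool) : Decidable (Spec_CheckCS word out) := by unfold Spec_CheckCS; infer_instance

-- ===== CLAIM (what is proved, stated in full; the proofs are below) =====
def Claim_equal_CheckCS : Prop := ∀ (word : String), Dom_CheckCS word → Spec_CheckCS word (CheckCS word)

-- ===== LEMMAS AND PROOFS =====

-- A's loop once the flag is set: it returns true iff an 's' remains.
theorem CheckCSLoop_true (l : List Char) : CheckCSLoop l true = decide ('s' ∈ l) := by
  induction l with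
  | nil => simp [CheckCSLoop]
  | cons i rest ih =>
    simp only [CheckCSLoop]
    by_cases hs : i = 's'
    · simp [hs]
    · by_cases hc : i = 'c' <;> simp [hs, hc, ih, Ne.symm hs]

-- A's loop from a clear flag: false if no 'c'; otherwise 's' in the suffix from the first 'c'.
theorem CheckCSLoop_false (l : List Char) :
    CheckCSLoop l false = if 'c' ∉ l then false else decide ('s' ∈ l.drop (l.idxOf 'c')) := by
  induction l with
  | nil => simp [CheckCSLoop]
  | cons i rest ih =>
    by_cases hc : i = 'c'
    · subst hc
      simp [CheckCSLoop, CheckCSLoop_true]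
    · simp only [CheckCSLoop, if_neg hc]
      rw [if_neg (by simp), ih]
      by_cases hm : 'c' ∈ rest
      · simp [hm, hc, Ne.symm hc]
      · simp [hm, Ne.symm hc]

theorem singleton_prefix_iff (a : Char) (t : List Char) : [a] <+: t ↔ t[0]? = some a := by
  cases t with
  | nil => simp
  | cons b t => simp [List.cons_prefix_cons, eq_comm]

theorem singleton_infix_iff (a : Char) (t : List Char) : [a] <:+: t ↔ a ∈ t := by
  constructor
  · intro h; exact h.subset (List.mem_singleton_self a)
  · intro h
    obtain ⟨s, u, rfl⟩ := List.append_of_mem h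
    exact ⟨s, u, by simp⟩

theorem idxOf_eq_of_getElem? (a : Char) (l : List Char) (n : ℕ)
    (h1 : l[n]? = some a) (h2 : ∀ i < n, l[i]? ≠ some a) : l.idxOf a = n := by
  induction l generalizing n with
  | nil => simp at h1
  | cons b l ih =>
    cases n with
    | zero =>
      simp at h1
      simp [h1]
    | succ n =>
      have hb : b ≠ a := by
        intro hba
        exact h2 0 (Nat.succ_pos n) (by simp [hba])
      simp only [List.getElem?_cons_succ] at h1
      have := ih n h1 (fun i hi => by
        have := h2 (i + 1) (Nat.succ_lt_succ hi)
        simpa using this)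
      simp [hb, this]

theorem find_singleton_of_mem (a : Char) (l : List Char) (h : a ∈ l) :
    PySem.Chars.find l [a] = (l.idxOf a : Int) := by
  have hinf : [a] <:+: l := (singleton_infix_iff a l).mpr h
  have h0 : 0 ≤ PySem.Chars.find l [a] := (PySem.Chars.find_nonneg_iff l [a]).mpr hinf
  obtain ⟨hpre, hmin⟩ := PySem.Chars.find_spec h0
  set n := (PySem.Chars.find l [a]).toNat with hn
  have h1 : l[n]? = some a := by
    have := (singleton_prefix_iff a (l.drop n)).mp hpre
    simpa [List.getElem?_drop] using this
  have h2 : ∀ i < n, l[i]? ≠ some a := by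
    intro i hi hget
    exact hmin i hi ((singleton_prefix_iff a (l.drop i)).mpr (by simpa [List.getElem?_drop] using hget))
  rw [idxOf_eq_of_getElem? a l n h1 h2]
  omega

-- rfind.go on a single-character needle, characterised by ≥: some occurrence lies in [i, k].
theorem rfind_go_ge_iff (a : Char) (l : List Char) (k i : ℕ) :
    ((i : Int) ≤ PySem.Chars.rfind.go l [a] k) ↔ ∃ j, i ≤ j ∧ j ≤ k ∧ l[j]? = some a := by
  induction k with
  | zero =>
    simp only [PySem.Chars.rfind.go]
    split_ifs with hp
    · rw [List.isPrefixOf_iff_prefix, singleton_prefix_iff] at hp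
      constructor
      · intro hle
        exact ⟨0, by omega, Nat.le_refl 0, hp⟩
      · rintro ⟨j, hij, hj0, _⟩; omega
    · rw [List.isPrefixOf_iff_prefix, singleton_prefix_iff] at hp
      constructor
      · intro hle; omega
      · rintro ⟨j, hij, hj0, hget⟩
        interval_cases j
        exact absurd hget hp
  | succ k ih =>
    simp only [PySem.Chars.rfind.go]
    split_ifs with hp
    · rw [List.isPrefixOf_iff_prefix, singleton_prefix_iff] at hp
      have hk1 : l[k + 1]? = some a := by simpa [List.getElem?_drop] using hp
      constructor
      · intro hle
        exact ⟨k + 1, by omega, Nat.le_refl _, hk1⟩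
      · rintro ⟨j, hij, hjk, _⟩
        have : (j : Int) ≤ (k : Int) + 1 := by omega
        omega
    · rw [List.isPrefixOf_iff_prefix, singleton_prefix_iff] at hp
      rw [ih]
      constructor
      · rintro ⟨j, hij, hjk, hget⟩
        exact ⟨j, hij, Nat.le_succ_of_le hjk, hget⟩
      · rintro ⟨j, hij, hjk, hget⟩
        refine ⟨j, hij, ?_, hget⟩
        rcases Nat.lt_succ_iff_lt_or_eq.mp (Nat.lt_succ_of_le hjk) with h | h
        · omega
        · subst h
          rw [List.getElem?_drop] at hp
          simp at hp
          exact absurd hget (by simpa using hp)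

theorem rfind_ge_iff (a : Char) (l : List Char) (i : ℕ) :
    ((i : Int) ≤ PySem.Chars.rfind l [a]) ↔ a ∈ l.drop i := by
  show ((i : Int) ≤ PySem.Chars.rfind.go l [a] l.length) ↔ _
  rw [rfind_go_ge_iff]
  constructor
  · rintro ⟨j, hij, _, hget⟩
    rw [List.mem_iff_getElem?]
    exact ⟨j - i, by rw [List.getElem?_drop]; rwa [Nat.add_sub_cancel' hij]⟩
  · intro h
    rw [List.mem_iff_getElem?] at h
    obtain ⟨m, hm⟩ := h
    rw [List.getElem?_drop] at hm
    have hlt : i + m < l.length := (List.getElem?_eq_some_iff.mp hm).1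
    exact ⟨i + m, Nat.le_add_right i m, by omega, hm⟩

-- B's two-search comparison equals the locate-then-suffix characterisation of A's loop.
theorem alt_eq (word : String) :
    CheckCS_alt word = if 'c' ∉ word.toList then false
      else decide ('s' ∈ word.toList.drop (word.toList.idxOf 'c')) := by
  unfold CheckCS_alt
  have hfind : PySem.Str.find word "c" = PySem.Chars.find word.toList ['c'] := by
    simp [PySem.Str.find_eq]
  have hrfind : PySem.Str.rfind word "s" = PySem.Chars.rfind word.toList ['s'] := by
    simp [PySem.Str.rfind_eq]
  by_cases hc : 'c' ∈ word.toList
  · rw [if_neg (by simpa using hc)]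
    simp only [hfind, hrfind, find_singleton_of_mem 'c' word.toList hc]
    rw [decide_eq_decide]
    rw [ge_iff_le, rfind_ge_iff 's' word.toList (word.toList.idxOf 'c')]
    constructor
    · rintro ⟨_, h⟩; exact h
    · intro h
      exact ⟨by omega, h⟩
  · rw [if_pos (by simpa using hc)]
    have : PySem.Chars.find word.toList ['c'] = -1 :=
      (PySem.Chars.find_eq_neg_one_iff _ _).mpr (fun hinf => hc ((singleton_infix_iff _ _).mp hinf))
    simp [this]

-- ===== VERDICT (by name: the statement is the Claim_ definition above) =====
theorem CheckCS_spec : Claim_equal_CheckCS := by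
  intro word _
  unfold Spec_CheckCS CheckCS
  rw [CheckCSLoop_false, alt_eq]
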